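-- pv_equiv track=rewrite | github.com/GF0201/CWKGQA | intent_workspace/scripts/train_intent_model.py | _binarize_labels
-- ===== SOURCE A (Python) =====
-- from typing import Any, Dict, List, Tuple
--
-- def _binarize_labels(label_lists: List[List[str]]) -> Tuple[List[str], List[List[int]]]:
--     all_labels: List[str] = sorted({l for labels in label_lists for l in labels})
--     label_to_idx = {l: i for i, l in enumerate(all_labels)}
--     Y: List[List[int]] = []
--     for labels in label_lists:
--         row = [0] * len(all_labels)
--         for l in labels:
--             if l in label_to_idx:
--                 row[label_to_idx[l]] = 1
--         Y.append(row)
--     return all_labels, Y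
-- ===== SOURCE B (Python) =====
-- from typing import Any, Dict, List, Tuple
--
-- def _binarize_labels(label_lists: List[List[str]]) -> Tuple[List[str], List[List[int]]]:
--     all_labels: List[str] = sorted({l for labels in label_lists for l in labels})
--     Y: List[List[int]] = []
--     for labels in label_lists:
--         row_set = set(labels)
--         Y.append([1 if lbl in row_set else 0 for lbl in all_labels])
--     return all_labels, Y
-- ===== Notes on version B (the rewrite author's own statement) =====
-- stated objective: idiomatic
-- what changed: The indicator row is built by iterating over all_labels with a membership test against a per-row set, instead of allocating a zero row and scattering 1s by index through a label->index dict (which is dropped entirely).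
import Mathlib
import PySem

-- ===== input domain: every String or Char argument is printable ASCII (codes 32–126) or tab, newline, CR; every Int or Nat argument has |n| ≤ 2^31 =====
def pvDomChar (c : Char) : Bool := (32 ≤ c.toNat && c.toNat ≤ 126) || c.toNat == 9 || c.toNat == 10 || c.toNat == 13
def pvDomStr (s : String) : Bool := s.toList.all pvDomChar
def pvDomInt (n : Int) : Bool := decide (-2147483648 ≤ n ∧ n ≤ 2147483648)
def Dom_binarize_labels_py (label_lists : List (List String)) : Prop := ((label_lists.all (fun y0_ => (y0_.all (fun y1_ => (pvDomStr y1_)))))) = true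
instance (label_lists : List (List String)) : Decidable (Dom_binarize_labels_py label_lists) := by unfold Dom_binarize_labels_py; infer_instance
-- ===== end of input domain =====

-- B builds each indicator row by mapping over all_labels with a membership test against a
-- per-row set, instead of A's zero row mutated by index through a label->index dict (idiomatic).

-- ===== PORT A =====
-- literal transliteration: set comprehension → Set.ofList of the flattened labels; sorted;
-- dict comprehension over enumerate; per row: [0]*n then row[label_to_idx[l]] = 1 (index
-- always in range, so List.set is exact here).
def binarize_labels_py (label_lists : List (List String)) : List String × List (List Int) :=
  let all_labels : List String :=
    PySem.List.sorted (PySem.Set.ofList (label_lists.flatMap (fun labels => labels))) (fun x => x) false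
  let label_to_idx : PySem.Dict String Int :=
    (PySem.List.enumerate all_labels 0).foldl (fun d p => d.insert p.2 p.1) PySem.Dict.empty
  let Y : List (List Int) :=
    label_lists.foldl (fun Y labels =>
      let row0 : List Int := PySem.List.pyRepeat [(0 : Int)] (all_labels.length : Int)
      let row := labels.foldl (fun row l =>
        match label_to_idx.get? l with
        | some i => row.set i.toNat 1
        | none => row) row0
      Y ++ [row]) []
  (all_labels, Y)

-- ===== PORT B =====
def binarize_labels_py_alt (label_lists : List (List String)) : List String × List (List Int) :=
  let all_labels : List String :=
    PySem.List.sorted (PySem.Set.ofList (label_lists.flatMap (fun labels => labels))) (fun x => x) false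
  let Y : List (List Int) :=
    label_lists.map (fun labels =>
      let row_set : PySem.Set String := PySem.Set.ofList labels
      all_labels.map (fun lbl => if PySem.Set.contains row_set lbl then (1 : Int) else 0))
  (all_labels, Y)

-- ===== PRECONDITION & SPEC =====
def Spec_binarize_labels_py (label_lists : List (List String)) (out : List String × List (List Int)) : Prop := out = binarize_labels_py_alt label_lists
instance (label_lists : List (List String)) (out : List String × List (List Int)) : Decidable (Spec_binarize_labels_py label_lists out) := by unfold Spec_binarize_labels_py; infer_instance

-- ===== CLAIM (what is proved, stated in full; the proofs are below) =====
def Claim_equal_binarize_labels_py : Prop := ∀ (label_lists : List (List String)), Dom_binarize_labels_py label_lists → Spec_binarize_labels_py label_lists (binarize_labels_py label_lists)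

-- ===== LEMMAS AND PROOFS =====

-- The dict {l: i for i, l in enumerate(as)} looks up, on a duplicate-free as, the index of l.
theorem pv_dict_get (as : List String) (hnd : as.Nodup) (l : String) (s : Int) (d : PySem.Dict String Int) :
    ((PySem.List.enumerate as s).foldl (fun d p => d.insert p.2 p.1) d).get? l
      = if l ∈ as then some (s + (as.idxOf l : Nat)) else d.get? l := by
  induction as generalizing s d with
  | nil => simp [PySem.List.enumerate_nil]
  | cons a t ih =>
    rw [PySem.List.enumerate_cons]
    simp only [List.foldl_cons]
    rw [ih (List.Nodup.of_cons hnd)]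
    by_cases hlt : l ∈ t
    · have hla : l ≠ a := by rintro rfl; exact (List.nodup_cons.mp hnd).1 hlt
      simp [hlt, hla, hla.symm]
      ring
    · by_cases hla : l = a
      · subst hla
        simp [hlt, PySem.Dict.get?_insert_self]
      · simp [hlt, hla, PySem.Dict.get?_insert_of_ne _ _ hla]

-- Setting position idxOf l of a mapped row to 1 flips exactly the entry of l (as duplicate-free).
theorem pv_set_map (as : List String) (hnd : as.Nodup) (f : String → Int) (l : String) (hm : l ∈ as) :
    (as.map f).set (as.idxOf l) 1 = as.map (fun x => if x = l then 1 else f x) := by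
  induction as with
  | nil => cases hm
  | cons a t ih =>
    by_cases hla : l = a
    · subst hla
      have hnt : l ∉ t := (List.nodup_cons.mp hnd).1
      simp only [List.idxOf_cons_self, List.map_cons, List.set_cons_zero]
      congr 1
      exact (List.map_congr_left (fun x hx => by
        have : x ≠ l := fun h => hnt (h ▸ hx)
        simp [this])).symm
    · have hlt : l ∈ t := (List.mem_cons.mp hm).resolve_left hla
      have hb : (a == l) = false := by simp [Ne.symm hla]
      rw [List.idxOf_cons, hb, cond_false]
      simp only [List.map_cons, List.set_cons_succ]
      rw [ih (List.Nodup.of_cons hnd) hlt]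
      simp [Ne.symm hla]

-- A's inner scatter loop over labels, started on any mapped row, equals the membership map.
theorem pv_row_eq (as : List String) (hnd : as.Nodup) (labels : List String)
    (hsub : ∀ l ∈ labels, l ∈ as) (f : String → Int) :
    labels.foldl (fun row l =>
        match ((PySem.List.enumerate as 0).foldl (fun d p => d.insert p.2 p.1) PySem.Dict.empty).get? l with
        | some i => row.set i.toNat 1
        | none => row) (as.map f)
      = as.map (fun x => if x ∈ labels then 1 else f x) := by
  induction labels generalizing f with
  | nil => simp
  | cons l rest ih =>
    have hl : l ∈ as := hsub l (List.mem_cons_self ..)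
    simp only [List.foldl_cons]
    rw [pv_dict_get as hnd l 0 PySem.Dict.empty, if_pos hl]
    dsimp only
    rw [show ((0 : Int) + (as.idxOf l : Nat)).toNat = as.idxOf l by simp,
        pv_set_map as hnd f l hl,
        ih (fun x hx => hsub x (List.mem_cons_of_mem _ hx))]
    apply List.map_congr_left
    intro x _
    by_cases h1 : x ∈ rest <;> by_cases h2 : x = l <;> simp [h1, h2]

-- ===== VERDICT (by name: the statement is the Claim_ definition above) =====
theorem binarize_labels_py_spec : Claim_equal_binarize_labels_py := by
  intro label_lists _
  unfold Spec_binarize_labels_py binarize_labels_py binarize_labels_py_alt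
  simp only
  set as : List String :=
    PySem.List.sorted (PySem.Set.ofList (label_lists.flatMap (fun labels => labels))) (fun x => x) false with has
  have hnd : as.Nodup := by
    rw [has]
    exact ((PySem.List.sorted_perm _ _ _).nodup_iff).mpr (PySem.Set.nodup_ofList _)
  have hmem : ∀ labels ∈ label_lists, ∀ l ∈ labels, l ∈ as := by
    intro labels hlab l hl
    rw [has, PySem.List.mem_sorted, PySem.Set.mem_ofList, List.mem_flatMap]
    exact ⟨labels, hlab, hl⟩
  refine Prod.ext rfl ?_
  rw [PySem.List.foldl_append_singleton_eq_map]
  simp only [List.nil_append]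
  apply List.map_congr_left
  intro labels hlab
  have hrep : PySem.List.pyRepeat [(0 : Int)] (as.length : Int) = as.map (fun _ => 0) := by
    rw [PySem.List.pyRepeat_singleton]
    simp [List.map_const']
  rw [hrep, pv_row_eq as hnd labels (hmem labels hlab) (fun _ => 0)]
  apply List.map_congr_left
  intro x _
  by_cases hx : x ∈ labels
  · simp [PySem.Set.contains, PySem.Set.mem_ofList, hx]
  · simp [PySem.Set.contains, PySem.Set.mem_ofList, hx]
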